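-- pv_equiv track=rewrite | github.com/angelakis/rosalind-solutions | grph.py | calculate_overlap_graph
-- ===== SOURCE A (Python) =====
-- def calculate_overlap_graph(fasta_dna_strings):
--     edges = []
--     for label_suff, dna_suff in fasta_dna_strings.items():
--         for label_pref, dna_pref in fasta_dna_strings.items():
--             if label_pref == label_suff:
--                 continue
--             if dna_suff[-3:] == dna_pref[:3]:
--                 edges.append((label_suff, label_pref))
--     return(edges)
-- ===== SOURCE B (Python) =====
-- def calculate_overlap_graph(fasta_dna_strings):
--     by_prefix = {}
--     for label, dna in fasta_dna_strings.items():
--         p = dna[:3]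
--         by_prefix[p] = by_prefix.get(p, []) + [label]
--     edges = []
--     for label, dna in fasta_dna_strings.items():
--         for other in by_prefix.get(dna[-3:], []):
--             if other != label:
--                 edges.append((label, other))
--     return edges
-- ===== Notes on version B (the rewrite author's own statement) =====
-- stated objective: faster
-- what changed: Replaced the all-pairs double scan with a single pass that groups labels in a dict keyed by 3-char prefix, then one lookup of each suffix, emitting the same edges in the same order.
import Mathlib
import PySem

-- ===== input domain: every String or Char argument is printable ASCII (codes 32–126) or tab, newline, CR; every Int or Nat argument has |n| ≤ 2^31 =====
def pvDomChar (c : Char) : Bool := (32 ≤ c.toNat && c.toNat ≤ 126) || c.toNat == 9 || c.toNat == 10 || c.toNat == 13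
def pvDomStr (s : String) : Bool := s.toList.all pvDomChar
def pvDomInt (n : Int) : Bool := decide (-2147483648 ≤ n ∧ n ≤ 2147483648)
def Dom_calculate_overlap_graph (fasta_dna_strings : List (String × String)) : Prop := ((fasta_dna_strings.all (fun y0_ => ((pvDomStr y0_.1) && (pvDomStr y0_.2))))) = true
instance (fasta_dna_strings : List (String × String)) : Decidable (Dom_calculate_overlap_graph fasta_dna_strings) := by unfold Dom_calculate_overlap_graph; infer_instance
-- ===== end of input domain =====

-- B replaces A's all-pairs double scan by a dict that groups labels by 3-char prefix,
-- then one lookup per suffix — same edges, same order, O(n + E) instead of O(n^2).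

-- ===== PORT A =====
def calculate_overlap_graph (fasta_dna_strings : List (String × String)) : List (String × String) :=
  fasta_dna_strings.foldl (fun edges ps =>
    fasta_dna_strings.foldl (fun edges pp =>
      if pp.1 == ps.1 then edges
      else if PySem.Str.slice ps.2 (some (-3)) none == PySem.Str.slice pp.2 none (some 3) then
        edges ++ [(ps.1, pp.1)]
      else edges) edges) []

-- ===== PORT B =====
def calculate_overlap_graph_alt (fasta_dna_strings : List (String × String)) : List (String × String) :=
  let by_prefix : PySem.Dict String (List String) :=
    fasta_dna_strings.foldl
      (fun d q => d.modify (PySem.Str.slice q.2 none (some 3)) [] (· ++ [q.1]))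
      PySem.Dict.empty
  fasta_dna_strings.foldl (fun edges p =>
    (by_prefix.getD (PySem.Str.slice p.2 (some (-3)) none) []).foldl
      (fun edges other => if other != p.1 then edges ++ [(p.1, other)] else edges)
      edges) []

-- ===== PRECONDITION & SPEC =====
-- The Python argument is a dict, whose keys are necessarily distinct; Pre_ restricts the
-- association-list representation to exactly those lists that denote a dict (no duplicate labels).
def Pre_calculate_overlap_graph (fasta_dna_strings : List (String × String)) : Prop :=
  (fasta_dna_strings.map Prod.fst).Nodup
instance (fasta_dna_strings : List (String × String)) : Decidable (Pre_calculate_overlap_graph fasta_dna_strings) := by unfold Pre_calculate_overlap_graph; infer_instance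
def pvWitness_calculate_overlap_graph : (List (String × String)) := [("a", "AATGC"), ("b", "TGCAA"), ("c", "GCAAT")]
def Spec_calculate_overlap_graph (fasta_dna_strings : List (String × String)) (out : List (String × String)) : Prop := out = calculate_overlap_graph_alt fasta_dna_strings
instance (fasta_dna_strings : List (String × String)) (out : List (String × String)) : Decidable (Spec_calculate_overlap_graph fasta_dna_strings out) := by unfold Spec_calculate_overlap_graph; infer_instance

-- ===== CLAIM (what is proved, stated in full; the proofs are below) =====
def Claim_equal_calculate_overlap_graph : Prop := ∀ (fasta_dna_strings : List (String × String)), Dom_calculate_overlap_graph fasta_dna_strings → Pre_calculate_overlap_graph fasta_dna_strings → Spec_calculate_overlap_graph fasta_dna_strings (calculate_overlap_graph fasta_dna_strings)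

-- ===== LEMMAS AND PROOFS =====

-- B's grouping dict, characterised: the bucket of key c holds, in order, the labels of
-- exactly the entries whose 3-char prefix is c.
theorem bucket_spec (f : List (String × String)) (c : String) :
    (f.foldl (fun d q => d.modify (PySem.Str.slice q.2 none (some 3)) [] (· ++ [q.1]))
      (PySem.Dict.empty : PySem.Dict String (List String))).getD c []
    = (f.filter (fun q => PySem.Str.slice q.2 none (some 3) == c)).map Prod.fst := by
  have h := PySem.Dict.getD_foldl_modify_append
    (f.map (fun q => (PySem.Str.slice q.2 none (some 3), q.1)))
    (PySem.Dict.empty : PySem.Dict String (List String)) c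
  rw [List.foldl_map] at h
  simpa [List.filter_map, List.map_map, Function.comp_def] using h

-- ===== VERDICT (by name: the statement is the Claim_ definition above) =====

theorem calculate_overlap_graph_spec : Claim_equal_calculate_overlap_graph := by
  intro f _ _
  unfold Spec_calculate_overlap_graph calculate_overlap_graph calculate_overlap_graph_alt
  refine PySem.List.foldl_congr_mem _ _ _ _ (fun edges p _ => ?_)
  rw [bucket_spec]
  -- A's inner loop: collapse the two branches into one test, then close the loop shape
  rw [PySem.List.foldl_congr_mem _ _
    (fun edges q =>
      if (q.1 != p.1) && (PySem.Str.slice q.2 none (some 3) == PySem.Str.slice p.2 (some (-3)) none)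
      then edges ++ [(p.1, q.1)] else edges) _
    (fun edges q _ => by
      cases h1 : q.1 == p.1 <;>
        cases h2 : PySem.Str.slice p.2 (some (-3)) none == PySem.Str.slice q.2 none (some 3) <;>
        simp only [h1, bne, Bool.not_true, Bool.not_false, Bool.false_and, Bool.true_and, if_true] <;>
        simp_all [BEq.comm])]
  rw [PySem.List.foldl_append_if, PySem.List.foldl_append_if, List.filter_map,
    List.filter_filter, List.map_map]
  simp [Function.comp_def]
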